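-- pv_equiv track=rewrite | github.com/bzantium/megatext | src/megatext/utils/training.py | parse_custom_args
-- ===== SOURCE A (Python) =====
-- def parse_custom_args(argv):
--   """Load multiple YAML config files from command line arguments."""
--   configs = []
--   current_argv = []
--   python_script = argv[0]
--   for arg in argv[1:]:
--     if arg.endswith((".yaml", ".yml")):
--       if current_argv:
--         configs.append(current_argv)
--       current_argv = [python_script, arg]
--     else:
--       current_argv.append(arg)
--   if current_argv:
--     configs.append(current_argv)
--   return configs
-- ===== SOURCE B (Python) =====
-- def parse_custom_args(argv):
--   """Load multiple YAML config files from command line arguments."""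
--   script, rest = argv[0], argv[1:]
--   bounds = [i for i in range(len(rest))
--             if rest[i].endswith(".yaml") or rest[i].endswith(".yml")]
--   ends = bounds[1:] + [len(rest)]
--   lead = rest[:bounds[0]] if bounds else rest
--   groups = [lead] if lead else []
--   for i, e in zip(bounds, ends):
--     groups.append([script] + rest[i:e])
--   return groups
-- ===== Notes on version B (the rewrite author's own statement) =====
-- stated objective: alternative
-- what changed: B replaces A's single stateful fold (mutable current group + flush-on-YAML) by a two-pass boundary construction: first collect the indices of YAML args, then build each group directly as a slice of argv[1:] between consecutive boundaries.
-- outside the precondition, e.g. on parse_custom_args([]): A raises IndexError, B raises IndexError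
import Mathlib
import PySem

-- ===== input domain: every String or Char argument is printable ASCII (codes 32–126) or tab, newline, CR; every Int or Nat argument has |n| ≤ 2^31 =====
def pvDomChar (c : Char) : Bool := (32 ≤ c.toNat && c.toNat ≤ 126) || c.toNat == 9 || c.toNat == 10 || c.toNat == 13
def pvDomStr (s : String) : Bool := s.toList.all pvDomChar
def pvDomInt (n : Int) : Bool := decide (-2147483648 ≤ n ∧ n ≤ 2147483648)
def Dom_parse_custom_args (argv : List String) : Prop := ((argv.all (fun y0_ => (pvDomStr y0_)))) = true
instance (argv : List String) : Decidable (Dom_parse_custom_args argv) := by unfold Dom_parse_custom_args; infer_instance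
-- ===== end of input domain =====

-- A vs B: A keeps a mutable current group and flushes it at each YAML arg; B
-- first computes the boundary indices of the YAML args and then builds each
-- group as a slice between consecutive boundaries. Equal return values proved
-- for every nonempty argv (A raises IndexError on []).

-- ===== PORT A =====
def parse_custom_args (argv : List String) : List (List String) :=
  match argv with
  | [] => []  -- Python raises IndexError (argv[0]); excluded by Pre_
  | python_script :: rest =>
    let st := rest.foldl (fun (s : List (List String) × List String) arg =>
        if PySem.Str.endswith arg ".yaml" || PySem.Str.endswith arg ".yml" then
          ((if s.2 = [] then s.1 else s.1 ++ [s.2]), [python_script, arg])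
        else (s.1, s.2 ++ [arg])) ([], [])
    if st.2 = [] then st.1 else st.1 ++ [st.2]

-- ===== PORT B =====
-- B-side helpers (the named intermediate values of Source B)
def pvBounds (rest : List String) : List Nat :=
  (List.range rest.length).filter
    (fun i => PySem.Str.endswith (rest.getD i "") ".yaml" || PySem.Str.endswith (rest.getD i "") ".yml")

def pvLead (rest : List String) : List String :=
  match pvBounds rest with
  | [] => rest
  | i :: _ => rest.take i

def pvZipGroups (script : String) (rest : List String) : List (List String) :=
  (((pvBounds rest).zip ((pvBounds rest).tail ++ [rest.length]))).map
    (fun p => script :: ((rest.drop p.1).take (p.2 - p.1)))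

def parse_custom_args_alt (argv : List String) : List (List String) :=
  match argv with
  | [] => []  -- Python raises IndexError (argv[0]); excluded by Pre_
  | script :: rest =>
    (if pvLead rest = [] then [] else [pvLead rest]) ++ pvZipGroups script rest

-- ===== PRECONDITION & SPEC =====
-- Pre_ excludes only argv = [], on which Python A raises IndexError (argv[0]).
def Pre_parse_custom_args (argv : List String) : Prop := argv ≠ []
instance (argv : List String) : Decidable (Pre_parse_custom_args argv) := by
  unfold Pre_parse_custom_args; infer_instance
def pvWitness_parse_custom_args : List String := ["run.py", "a.yaml", "x"]

def Spec_parse_custom_args (argv : List String) (out : List (List String)) : Prop :=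
  out = parse_custom_args_alt argv
instance (argv : List String) (out : List (List String)) : Decidable (Spec_parse_custom_args argv out) := by
  unfold Spec_parse_custom_args; infer_instance

-- ===== CLAIM (what is proved, stated in full; the proofs are below) =====
def Claim_equal_parse_custom_args : Prop :=
  ∀ (argv : List String), Dom_parse_custom_args argv → Pre_parse_custom_args argv →
    Spec_parse_custom_args argv (parse_custom_args argv)

-- ===== LEMMAS AND PROOFS =====

-- A's per-element step, named for the proofs
def pvStepA (script : String) (s : List (List String) × List String) (arg : String) :
    List (List String) × List String :=
  if PySem.Str.endswith arg ".yaml" || PySem.Str.endswith arg ".yml" then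
    ((if s.2 = [] then s.1 else s.1 ++ [s.2]), [script, arg])
  else (s.1, s.2 ++ [arg])

def pvFin (s : List (List String) × List String) : List (List String) :=
  if s.2 = [] then s.1 else s.1 ++ [s.2]

def pvOptL (l : List String) : List (List String) := if l = [] then [] else [l]

lemma pvStepA_fold_prefix (script : String) (rest : List String) :
    ∀ (cfgs : List (List String)) (cur : List String),
      rest.foldl (pvStepA script) (cfgs, cur)
        = (cfgs ++ (rest.foldl (pvStepA script) ([], cur)).1,
           (rest.foldl (pvStepA script) ([], cur)).2) := by
  induction rest with
  | nil => intro cfgs cur; simp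
  | cons a t ih =>
    intro cfgs cur
    simp only [List.foldl_cons, pvStepA]
    by_cases h : (PySem.Str.endswith a ".yaml" || PySem.Str.endswith a ".yml") = true
    · simp only [h, if_pos]
      by_cases hc : cur = []
      · subst hc
        simpa using ih cfgs [script, a]
      · simp only [if_neg hc, List.nil_append]
        rw [ih (cfgs ++ [cur]) [script, a], ih [cur] [script, a]]
        simp
    · simp only [h]
      simp only [Bool.false_eq_true, if_false]
      exact ih cfgs (cur ++ [a])

lemma pvBounds_cons (a : String) (t : List String) :
    pvBounds (a :: t)
      = (if PySem.Str.endswith a ".yaml" || PySem.Str.endswith a ".yml" then [0] else [])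
        ++ (pvBounds t).map Nat.succ := by
  unfold pvBounds
  rw [show (a :: t).length = t.length + 1 from rfl, List.range_succ_eq_map,
      List.filter_cons, List.filter_map]
  have hpred : ((fun i => PySem.Str.endswith ((a :: t).getD i "") ".yaml"
        || PySem.Str.endswith ((a :: t).getD i "") ".yml") ∘ Nat.succ)
      = (fun i => PySem.Str.endswith (t.getD i "") ".yaml"
        || PySem.Str.endswith (t.getD i "") ".yml") := by
    funext i
    simp [Function.comp, List.getD]
  rw [hpred]
  have h0 : (a :: t).getD 0 "" = a := rfl
  by_cases h : (PySem.Str.endswith a ".yaml" || PySem.Str.endswith a ".yml") = true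
  · rw [if_pos (by rw [h0]; exact h), if_pos h, List.singleton_append]
  · rw [if_neg (by rw [h0]; exact h), if_neg h, List.nil_append]

lemma pvLead_cons_nonyaml (a : String) (t : List String)
    (h : ¬ (PySem.Str.endswith a ".yaml" || PySem.Str.endswith a ".yml") = true) :
    pvLead (a :: t) = a :: pvLead t := by
  unfold pvLead
  rw [pvBounds_cons, if_neg h, List.nil_append]
  cases hb : pvBounds t with
  | nil => simp
  | cons i is => simp

lemma pvZipShift (script a : String) (t : List String) (bs es : List Nat) :
    (((bs.map Nat.succ).zip (es.map Nat.succ)).map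
        (fun p => script :: ((a :: t).drop p.1).take (p.2 - p.1)))
      = ((bs.zip es).map (fun p => script :: ((t.drop p.1).take (p.2 - p.1)))) := by
  rw [List.zip_map, List.map_map]
  apply List.map_congr_left
  intro p _
  simp [Prod.map, Nat.succ_sub_succ]

lemma pvZipGroups_cons_nonyaml (script : String) (a : String) (t : List String)
    (h : ¬ (PySem.Str.endswith a ".yaml" || PySem.Str.endswith a ".yml") = true) :
    pvZipGroups script (a :: t) = pvZipGroups script t := by
  unfold pvZipGroups
  rw [pvBounds_cons, if_neg h, List.nil_append]
  rw [show (a :: t).length = t.length + 1 from rfl]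
  rw [show ((pvBounds t).map Nat.succ).tail ++ [t.length + 1]
        = ((pvBounds t).tail ++ [t.length]).map Nat.succ by
      simp [List.map_tail]]
  rw [List.zip_map]
  rw [List.map_map]
  apply List.map_congr_left
  intro p _
  simp [Nat.succ_sub_succ]

-- the heart: A's fold with pending group `cur` produces B's boundary groups
lemma pvMain (script : String) (rest : List String) :
    ∀ (cur : List String),
      pvFin (rest.foldl (pvStepA script) ([], cur))
        = pvOptL (cur ++ pvLead rest) ++ pvZipGroups script rest := by
  induction rest with
  | nil =>
    intro cur
    by_cases hc : cur = [] <;>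
      simp [pvFin, pvOptL, pvLead, pvBounds, pvZipGroups, hc]
  | cons a t ih =>
    intro cur
    simp only [List.foldl_cons, pvStepA]
    by_cases h : (PySem.Str.endswith a ".yaml" || PySem.Str.endswith a ".yml") = true
    · simp only [h, if_pos, List.nil_append]
      rw [pvStepA_fold_prefix script t (if cur = [] then [] else [cur]) [script, a]]
      have hfin : pvFin ((if cur = [] then [] else [cur])
            ++ (t.foldl (pvStepA script) ([], [script, a])).1,
            (t.foldl (pvStepA script) ([], [script, a])).2)
          = (if cur = [] then [] else [cur])
            ++ pvFin (t.foldl (pvStepA script) ([], [script, a])) := by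
        unfold pvFin
        by_cases h2 : (t.foldl (pvStepA script) ([], [script, a])).2 = [] <;> simp [h2]
      rw [hfin, ih [script, a]]
      -- now compute the RHS shape
      unfold pvZipGroups pvLead
      rw [pvBounds_cons, if_pos h, List.singleton_append]
      simp only [List.tail_cons]
      rw [show (a :: t).length = t.length + 1 from rfl]
      cases hb : pvBounds t with
      | nil =>
        simp only [List.map_nil, List.nil_append, List.zip_cons_cons, List.zip_nil_left,
          List.map_cons, List.map_nil, Nat.sub_zero, List.drop_zero]
        by_cases hc : cur = [] <;> simp [pvOptL, hc, List.take_of_length_le]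
      | cons b bs =>
        rw [show (b :: bs).map Nat.succ ++ [t.length + 1]
              = Nat.succ b :: (bs ++ [t.length]).map Nat.succ by simp]
        rw [show (0 : Nat) :: (b :: bs).map Nat.succ
              = 0 :: Nat.succ b :: bs.map Nat.succ from rfl]
        rw [List.zip_cons_cons, List.map_cons]
        rw [show Nat.succ b :: bs.map Nat.succ = (b :: bs).map Nat.succ from rfl,
            pvZipShift script a t (b :: bs) (bs ++ [t.length])]
        by_cases hc : cur = [] <;>
          simp [pvOptL, hc, List.take_succ_cons]
    · simp only [h, Bool.false_eq_true, if_false]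
      rw [ih (cur ++ [a]), pvLead_cons_nonyaml a t h, pvZipGroups_cons_nonyaml script a t h]
      simp

-- ===== VERDICT (by name: the statement is the Claim_ definition above) =====
theorem parse_custom_args_spec : Claim_equal_parse_custom_args := by
  intro argv _ hpre
  unfold Spec_parse_custom_args
  cases argv with
  | nil => exact absurd rfl hpre
  | cons script rest =>
    show pvFin (rest.foldl (pvStepA script) ([], [])) = _
    rw [pvMain script rest []]
    simp only [List.nil_append]
    show _ = (if pvLead rest = [] then [] else [pvLead rest]) ++ pvZipGroups script rest
    unfold pvOptL
    rfl
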